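-- pv_equiv track=rewrite | github.com/ChickenWings-0/Oasis | app/tabs.py | _fit_voicing_to_range
-- ===== SOURCE A (Python) =====
-- def _fit_voicing_to_range(notes: list[int], low: int = 48, high: int = 72) -> list[int]:
--     fitted = [int(n) for n in notes]
--     if not fitted:
--         return fitted
--
--     while min(fitted) < int(low):
--         fitted = [n + 12 for n in fitted]
--     while max(fitted) > int(high):
--         fitted = [n - 12 for n in fitted]
--
--     return fitted
-- ===== SOURCE B (Python) =====
-- def _fit_voicing_to_range(notes: list[int], low: int = 48, high: int = 72) -> list[int]:
--     fitted = [int(n) for n in notes]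
--     if not fitted:
--         return fitted
--     lo = min(fitted)
--     hi = max(fitted)
--     up = max(0, -((lo - int(low)) // 12))
--     down = max(0, -((int(high) - (hi + 12 * up)) // 12))
--     shift = 12 * (up - down)
--     return [n + shift for n in fitted]
-- ===== Notes on version B (the rewrite author's own statement) =====
-- stated objective: faster
-- what changed: Replaces the two while-loops that repeatedly shift the whole list by ±12 with a direct floor-division computation of the two octave offsets and a single shifted pass over the list.
import Mathlib
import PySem

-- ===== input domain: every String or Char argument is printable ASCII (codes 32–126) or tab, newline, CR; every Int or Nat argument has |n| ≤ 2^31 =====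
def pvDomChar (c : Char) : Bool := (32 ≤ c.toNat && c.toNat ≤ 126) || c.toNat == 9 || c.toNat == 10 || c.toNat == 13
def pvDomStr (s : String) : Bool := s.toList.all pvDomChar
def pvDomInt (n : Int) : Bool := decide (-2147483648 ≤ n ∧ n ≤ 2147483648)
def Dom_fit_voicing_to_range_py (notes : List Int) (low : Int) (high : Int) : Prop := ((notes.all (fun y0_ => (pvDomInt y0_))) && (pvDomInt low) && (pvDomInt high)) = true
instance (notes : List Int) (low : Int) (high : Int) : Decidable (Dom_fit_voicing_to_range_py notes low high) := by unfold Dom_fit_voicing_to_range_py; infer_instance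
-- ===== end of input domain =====

-- B replaces A's two repeated ±12 whole-list shift loops by a direct computation of the
-- octave offsets via floor division and a single shifted map (objective: faster).

-- min?/max? of a uniformly shifted list (cited by the ports' decreasing_by)
theorem foldl_min_map_add (xs : List Int) (x c : Int) :
    (xs.map (· + c)).foldl min (x + c) = xs.foldl min x + c := by
  induction xs generalizing x with
  | nil => simp
  | cons y ys ih => simp only [List.map_cons, List.foldl_cons, min_add_add_right, ih]

theorem foldl_max_map_add (xs : List Int) (x c : Int) :
    (xs.map (· + c)).foldl max (x + c) = xs.foldl max x + c := by
  induction xs generalizing x with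
  | nil => simp
  | cons y ys ih => simp only [List.map_cons, List.foldl_cons, max_add_add_right, ih]

theorem min?_map_add (xs : List Int) (c : Int) : (xs.map (· + c)).min? = xs.min?.map (· + c) := by
  cases xs with
  | nil => simp
  | cons x xs => rw [List.map_cons, List.min?_cons', List.min?_cons', foldl_min_map_add]; rfl

theorem max?_map_add (xs : List Int) (c : Int) : (xs.map (· + c)).max? = xs.max?.map (· + c) := by
  cases xs with
  | nil => simp
  | cons x xs => rw [List.map_cons, List.max?_cons', List.max?_cons', foldl_max_map_add]; rfl

theorem max?_map_sub (xs : List Int) (c : Int) : (xs.map (· - c)).max? = xs.max?.map (· - c) := by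
  have he : (fun n : Int => n - c) = (fun n : Int => n + (-c)) := funext fun n => by ring
  rw [he, max?_map_add]

-- ===== PORT A =====
-- 'while min(fitted) < low: fitted = [n + 12 for n in fitted]'
def fitUpA (fitted : List Int) (low : Int) : List Int :=
  match h : fitted.min? with
  | none => fitted
  | some m =>
    if hm : m < low then fitUpA (fitted.map (· + 12)) low else fitted
termination_by (low - fitted.min?.getD low).toNat
decreasing_by
  simp only [List.map_subtype, List.unattach_attach]
  rw [min?_map_add, h]
  simp
  omega

-- 'while max(fitted) > high: fitted = [n - 12 for n in fitted]'
def fitDownA (fitted : List Int) (high : Int) : List Int :=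
  match h : fitted.max? with
  | none => fitted
  | some m =>
    if hm : m > high then fitDownA (fitted.map (· - 12)) high else fitted
termination_by (fitted.max?.getD high - high).toNat
decreasing_by
  simp only [List.map_subtype, List.unattach_attach]
  rw [max?_map_sub, h]
  simp
  omega

def fit_voicing_to_range_py (notes : List Int) (low : Int) (high : Int) : List Int :=
  let fitted := notes.map (fun n => n)   -- [int(n) for n in notes]
  if fitted.isEmpty then fitted
  else fitDownA (fitUpA fitted low) high

-- ===== PORT B =====
def fit_voicing_to_range_py_alt (notes : List Int) (low : Int) (high : Int) : List Int :=
  let fitted := notes.map (fun n => n)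
  match fitted.min?, fitted.max? with
  | some lo, some hi =>
    let up := max 0 (-(PySem.Int.floordiv (lo - low) 12))
    let down := max 0 (-(PySem.Int.floordiv (high - (hi + 12 * up)) 12))
    let shift := 12 * (up - down)
    fitted.map (· + shift)
  | _, _ => fitted

-- ===== PRECONDITION & SPEC =====
def Spec_fit_voicing_to_range_py (notes : List Int) (low : Int) (high : Int) (out : List Int) : Prop := out = fit_voicing_to_range_py_alt notes low high
instance (notes : List Int) (low : Int) (high : Int) (out : List Int) : Decidable (Spec_fit_voicing_to_range_py notes low high out) := by unfold Spec_fit_voicing_to_range_py; infer_instance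

-- ===== CLAIM (what is proved, stated in full; the proofs are below) =====
def Claim_equal_fit_voicing_to_range_py : Prop := ∀ (notes : List Int) (low : Int) (high : Int), Dom_fit_voicing_to_range_py notes low high → Spec_fit_voicing_to_range_py notes low high (fit_voicing_to_range_py notes low high)

-- ===== LEMMAS AND PROOFS =====

-- the up-loop shifts every note by 12 * ceil((low - min)/12), clamped at 0
theorem fitUpA_eq (fitted : List Int) (low m : Int) (h : fitted.min? = some m) :
    fitUpA fitted low = fitted.map (· + 12 * max 0 (-((m - low) / 12))) := by
  by_cases hm : m < low
  · have hmin : (fitted.map (· + 12)).min? = some (m + 12) := by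
      rw [min?_map_add, h]; rfl
    have step : fitUpA fitted low = fitUpA (fitted.map (· + 12)) low := by
      rw [fitUpA.eq_def]
      split
      · rename_i h'; rw [h'] at h; cases h
      · rename_i m' h'
        rw [h] at h'
        injection h' with h2
        subst h2
        simp [hm]
    rw [step, fitUpA_eq (fitted.map (· + 12)) low (m + 12) hmin, List.map_map]
    apply List.map_congr_left
    intro a _
    simp only [Function.comp]
    omega
  · have hz : max 0 (-((m - low) / 12)) = 0 := by omega
    rw [fitUpA.eq_def]
    split
    · simp [hz]
    · rename_i m' h'
      rw [h] at h'
      injection h' with h2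
      subst h2
      simp [hm, hz]
termination_by (low - m).toNat
decreasing_by omega

-- the down-loop shifts every note by -12 * ceil((max - high)/12), clamped at 0
theorem fitDownA_eq (fitted : List Int) (high m : Int) (h : fitted.max? = some m) :
    fitDownA fitted high = fitted.map (· - 12 * max 0 (-((high - m) / 12))) := by
  by_cases hm : m > high
  · have hmax : (fitted.map (· - 12)).max? = some (m - 12) := by
      rw [max?_map_sub, h]; rfl
    have step : fitDownA fitted high = fitDownA (fitted.map (· - 12)) high := by
      rw [fitDownA.eq_def]
      split
      · rename_i h'; rw [h'] at h; cases h
      · rename_i m' h'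
        rw [h] at h'
        injection h' with h2
        subst h2
        simp [hm]
    rw [step, fitDownA_eq (fitted.map (· - 12)) high (m - 12) hmax, List.map_map]
    apply List.map_congr_left
    intro a _
    simp only [Function.comp]
    omega
  · have hz : max 0 (-((high - m) / 12)) = 0 := by omega
    rw [fitDownA.eq_def]
    split
    · simp [hz]
    · rename_i m' h'
      rw [h] at h'
      injection h' with h2
      subst h2
      simp [hm, hz]
termination_by (m - high).toNat
decreasing_by omega

-- ===== VERDICT (by name: the statement is the Claim_ definition above) =====
theorem fit_voicing_to_range_py_spec : Claim_equal_fit_voicing_to_range_py := by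
  intro notes low high _
  unfold Spec_fit_voicing_to_range_py fit_voicing_to_range_py fit_voicing_to_range_py_alt
  cases hn : notes.map (fun n => n) with
  | nil => simp
  | cons x xs =>
    have hne : (x :: xs).isEmpty = false := by simp
    obtain ⟨lo, hlo⟩ : ∃ lo, (x :: xs).min? = some lo := ⟨_, List.min?_cons⟩
    obtain ⟨hi, hhi⟩ : ∃ hi, (x :: xs).max? = some hi := ⟨_, List.max?_cons⟩
    simp only [hne, Bool.false_eq_true, if_false, hlo, hhi]
    rw [PySem.Int.floordiv_eq_ediv_of_pos (by norm_num), PySem.Int.floordiv_eq_ediv_of_pos (by norm_num)]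
    set up := max 0 (-((lo - low) / 12)) with hup
    have h1 : fitUpA (x :: xs) low = (x :: xs).map (· + 12 * up) := fitUpA_eq _ _ _ hlo
    have hmax2 : ((x :: xs).map (· + 12 * up)).max? = some (hi + 12 * up) := by
      rw [max?_map_add, hhi]; rfl
    have h2 := fitDownA_eq ((x :: xs).map (· + 12 * up)) high _ hmax2
    rw [h1, h2, List.map_map]
    apply List.map_congr_left
    intro a _
    simp only [Function.comp]
    omega
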